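-- pv_equiv track=rewrite | github.com/ha-ru-ki-o-no/python-apps-django | work06/views.py | seireki_to_wareki
-- ===== SOURCE A (Python) =====
-- def seireki_to_wareki(year):
--     eras = [
--         ("令和", 2019),
--         ("平成", 1989),
--         ("昭和", 1926),
--         ("大正", 1912),
--         ("明治", 1868),
--     ]
--     for era, start in eras:
--         if year >= start:
--             wareki_year = year - start + 1
--             if wareki_year == 1:
--                 return f"{era}元年"
--             else:
--                 return f"{era}{wareki_year}年"
--     return "それ以前の元号は未対応"
-- ===== SOURCE B (Python) =====
-- _STARTS = [1868, 1912, 1926, 1989, 2019]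
-- _NAMES = ["明治", "大正", "昭和", "平成", "令和"]
--
-- def _bisect_right(a, x):
--     lo, hi = 0, len(a)
--     while lo < hi:
--         mid = (lo + hi) // 2
--         if x < a[mid]:
--             hi = mid
--         else:
--             lo = mid + 1
--     return lo
--
-- def seireki_to_wareki(year):
--     i = _bisect_right(_STARTS, year)
--     if i == 0:
--         return "それ以前の元号は未対応"
--     start = _STARTS[i - 1]
--     name = _NAMES[i - 1]
--     wareki_year = year - start + 1
--     if wareki_year == 1:
--         return f"{name}元年"
--     return f"{name}{wareki_year}年"
-- ===== Notes on version B (the rewrite author's own statement) =====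
-- stated objective: alternative
-- what changed: Replaces A's descending linear scan over (era,start) pairs with a hand-written bisect_right binary search over the ascending start years, selecting the era by index.
import Mathlib
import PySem

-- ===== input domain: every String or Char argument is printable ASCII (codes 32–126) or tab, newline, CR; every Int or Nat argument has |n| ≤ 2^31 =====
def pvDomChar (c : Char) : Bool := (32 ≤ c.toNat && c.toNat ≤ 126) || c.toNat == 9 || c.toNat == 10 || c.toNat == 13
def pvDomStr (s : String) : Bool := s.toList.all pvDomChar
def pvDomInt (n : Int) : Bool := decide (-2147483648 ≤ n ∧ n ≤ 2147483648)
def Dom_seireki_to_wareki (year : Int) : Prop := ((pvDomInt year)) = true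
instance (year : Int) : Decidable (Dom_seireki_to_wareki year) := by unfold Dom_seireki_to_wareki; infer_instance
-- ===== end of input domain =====

-- B replaces A's descending linear scan of the era table with a bisect_right binary
-- search over the ascending start years (alternative structure, same cost at n = 5).

-- ===== PORT A =====
-- the 'for era, start in eras' loop of A, first match wins
def seirekiLoop (year : Int) : List (String × Int) → String
  | [] => "それ以前の元号は未対応"
  | (era, start) :: rest =>
    if year ≥ start then
      let wareki_year := year - start + 1
      if wareki_year = 1 then era ++ "元年"
      else era ++ PySem.Int.toStr wareki_year ++ "年"
    else seirekiLoop year rest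

def seireki_to_wareki (year : Int) : String :=
  seirekiLoop year [("令和", 2019), ("平成", 1989), ("昭和", 1926), ("大正", 1912), ("明治", 1868)]

-- ===== PORT B =====
-- Source B's hand-written bisect_right while-loop; a[mid] is always in range (lo < hi ≤ len a)
-- so List.getD is exact here, and (lo+hi)//2 on nonnegative Nats is exactly Nat division
def bisectRight (a : List Int) (x : Int) (lo hi : Nat) : Nat :=
  if lo < hi then
    let mid := (lo + hi) / 2
    if x < a.getD mid 0 then bisectRight a x lo mid
    else bisectRight a x (mid + 1) hi
  else lo
termination_by hi - lo
decreasing_by all_goals omega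

def seireki_to_wareki_alt (year : Int) : String :=
  let starts : List Int := [1868, 1912, 1926, 1989, 2019]
  let names : List String := ["明治", "大正", "昭和", "平成", "令和"]
  let i := bisectRight starts year 0 starts.length
  if i = 0 then "それ以前の元号は未対応"
  else
    let start := starts.getD (i - 1) 0
    let name := names.getD (i - 1) ""
    let wareki_year := year - start + 1
    if wareki_year = 1 then name ++ "元年"
    else name ++ PySem.Int.toStr wareki_year ++ "年"

-- ===== PRECONDITION & SPEC =====
def Spec_seireki_to_wareki (year : Int) (out : String) : Prop := out = seireki_to_wareki_alt year
instance (year : Int) (out : String) : Decidable (Spec_seireki_to_wareki year out) := by unfold Spec_seireki_to_wareki; infer_instance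

-- ===== CLAIM (what is proved, stated in full; the proofs are below) =====
def Claim_equal_seireki_to_wareki : Prop := ∀ (year : Int), Dom_seireki_to_wareki year → Spec_seireki_to_wareki year (seireki_to_wareki year)

-- ===== LEMMAS AND PROOFS =====

-- ===== VERDICT (by name: the statement is the Claim_ definition above) =====
set_option maxRecDepth 4000 in
set_option maxHeartbeats 1000000 in
theorem seireki_to_wareki_spec : Claim_equal_seireki_to_wareki := by
  intro year _
  unfold Spec_seireki_to_wareki seireki_to_wareki seireki_to_wareki_alt
  simp [bisectRight, seirekiLoop]
  split_ifs <;> first | rfl | omega | (norm_num [List.getD] at * <;> omega)
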